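-- pv_equiv track=rewrite | github.com/Legolas1086/bug_bounty | sell_guns/sell_guns.py | findExtras
-- ===== SOURCE A (Python) =====
-- def prices(extras):
--     total_cost = 0
--     for i in range(len(extras)):
--         if extras[i] == 'odin':
--             total_cost += 10000
--
--         elif extras[i] == 'operator':
--             total_cost += 8000
--
--         elif extras[i] == 'bulldog':
--             total_cost += 7000
--
--         elif extras[i] == 'bucky':
--             total_cost += 5000
--
--         elif extras[i] == 'ghost':
--             total_cost += 2000
--
--         elif extras[i] == 'ares':
--             total_cost += 9000
--
--     return total_cost
--
-- def findExtras(n,guns):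
--     extras = []
--     for i in range(n-1):
--         for j in range(i+1,n):
--             if guns[i] == guns[j]:
--                 extras.append(guns[j])
--                 break
--
--     total_cost = prices(extras)
--
--     return total_cost
-- ===== SOURCE B (Python) =====
-- PRICE = {'odin': 10000, 'operator': 8000, 'bulldog': 7000,
--          'bucky': 5000, 'ghost': 2000, 'ares': 9000}
--
-- def findExtras(n, guns):
--     # each value occurring m times among the first n guns contributes
--     # (m-1)*price: the window's total price minus the price of its distinct values
--     if n <= 1:
--         return 0  # fewer than two guns: no duplicate to price
--     window = [guns[i] for i in range(n)]
--     total = sum(PRICE.get(g, 0) for g in window)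
--     distinct = sum(PRICE.get(g, 0) for g in set(window))
--     return total - distinct
-- ===== Notes on version B (the rewrite author's own statement) =====
-- stated objective: faster
-- what changed: Replaces A's nested pairwise duplicate scan (building an extras list, then a second pricing pass) with the closed form 'total price of the window minus price of its distinct values', computed in one pass plus a set.
import Mathlib
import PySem

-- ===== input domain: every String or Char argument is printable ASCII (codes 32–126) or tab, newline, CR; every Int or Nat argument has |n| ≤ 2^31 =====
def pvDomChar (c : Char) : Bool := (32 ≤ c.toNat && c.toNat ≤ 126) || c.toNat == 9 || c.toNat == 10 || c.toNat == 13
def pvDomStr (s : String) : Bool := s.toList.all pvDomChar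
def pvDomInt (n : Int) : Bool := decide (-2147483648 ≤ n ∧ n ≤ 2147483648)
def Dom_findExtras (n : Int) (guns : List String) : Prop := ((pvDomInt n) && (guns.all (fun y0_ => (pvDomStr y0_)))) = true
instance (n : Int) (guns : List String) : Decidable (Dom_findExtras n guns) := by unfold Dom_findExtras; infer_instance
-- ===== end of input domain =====

-- B replaces A's nested pairwise duplicate scan by the closed form
-- "window's total price minus the price of its distinct values" (one pass + a set).

-- ===== PORT A =====
def pricesA (extras : List String) : Int :=
  (PySem.List.pyRange 0 (PySem.List.len extras) 1).foldl (fun total_cost i =>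
    if PySem.List.pyGetD extras i "" == "odin" then total_cost + 10000
    else if PySem.List.pyGetD extras i "" == "operator" then total_cost + 8000
    else if PySem.List.pyGetD extras i "" == "bulldog" then total_cost + 7000
    else if PySem.List.pyGetD extras i "" == "bucky" then total_cost + 5000
    else if PySem.List.pyGetD extras i "" == "ghost" then total_cost + 2000
    else if PySem.List.pyGetD extras i "" == "ares" then total_cost + 9000
    else total_cost) 0

def findExtras (n : Int) (guns : List String) : Int :=
  let extras := (PySem.List.pyRange 0 (n-1) 1).foldl (fun ex i =>
    match (PySem.List.pyRange (i+1) n 1).find?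
        (fun j => PySem.List.pyGetD guns j "" == PySem.List.pyGetD guns i "") with
    | some j => ex ++ [PySem.List.pyGetD guns j ""]
    | none => ex) []
  pricesA extras

-- ===== PORT B =====
def PRICE : PySem.Dict String Int := PySem.Dict.ofList
  [("odin", 10000), ("operator", 8000), ("bulldog", 7000),
   ("bucky", 5000), ("ghost", 2000), ("ares", 9000)]

def findExtras_alt (n : Int) (guns : List String) : Int :=
  if n ≤ 1 then 0
  else
    let window := (PySem.List.pyRange 0 n 1).map (fun i => PySem.List.pyGetD guns i "")
    let total := (window.map (fun g => PRICE.getD g 0)).sum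
    let distinct := ((PySem.Set.ofList window).map (fun g => PRICE.getD g 0)).sum
    total - distinct

-- ===== PRECONDITION & SPEC =====
-- Pre_ excludes exactly the inputs where A raises IndexError: n ≥ 2 with fewer than n guns.
def Pre_findExtras (n : Int) (guns : List String) : Prop :=
  n ≤ (guns.length : Int) ∨ n ≤ 1
instance (n : Int) (guns : List String) : Decidable (Pre_findExtras n guns) := by
  unfold Pre_findExtras; infer_instance
def pvWitness_findExtras : Int × List String := (3, ["odin", "ghost", "odin"])

def Spec_findExtras (n : Int) (guns : List String) (out : Int) : Prop := out = findExtras_alt n guns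
instance (n : Int) (guns : List String) (out : Int) : Decidable (Spec_findExtras n guns out) := by unfold Spec_findExtras; infer_instance

-- ===== CLAIM (what is proved, stated in full; the proofs are below) =====
def Claim_equal_findExtras : Prop := ∀ (n : Int) (guns : List String), Dom_findExtras n guns → Pre_findExtras n guns → Spec_findExtras n guns (findExtras n guns)

-- ===== LEMMAS AND PROOFS =====

-- price of one gun, as B looks it up
def pvP (g : String) : Int := PRICE.getD g 0

-- A's if/elif chain computes exactly B's dict lookup
set_option maxRecDepth 20000 in
lemma pvChainP (tc : Int) (x : String) :
    (if x == "odin" then tc + 10000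
     else if x == "operator" then tc + 8000
     else if x == "bulldog" then tc + 7000
     else if x == "bucky" then tc + 5000
     else if x == "ghost" then tc + 2000
     else if x == "ares" then tc + 9000
     else tc) = tc + pvP x := by
  have hP : PRICE = PySem.Dict.mk [("odin", 10000), ("operator", 8000), ("bulldog", 7000),
   ("bucky", 5000), ("ghost", 2000), ("ares", 9000)] := by decide
  simp only [beq_iff_eq]
  split_ifs with h1 h2 h3 h4 h5 h6
  · subst h1; rw [show pvP "odin" = 10000 by decide]
  · subst h2; rw [show pvP "operator" = 8000 by decide]
  · subst h3; rw [show pvP "bulldog" = 7000 by decide]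
  · subst h4; rw [show pvP "bucky" = 5000 by decide]
  · subst h5; rw [show pvP "ghost" = 2000 by decide]
  · subst h6; rw [show pvP "ares" = 9000 by decide]
  · have : pvP x = 0 := by
      simp only [pvP, hP, PySem.Dict.getD_eq_get?_getD, PySem.Dict.get?_mk_cons]
      rw [if_neg, if_neg, if_neg, if_neg, if_neg, if_neg] <;>
        first
          | rfl
          | (simp only [beq_iff_eq]
             first
               | exact fun h => h1 h.symm
               | exact fun h => h2 h.symm
               | exact fun h => h3 h.symm
               | exact fun h => h4 h.symm
               | exact fun h => h5 h.symm
               | exact fun h => h6 h.symm)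
    rw [this]; ring

-- "price each i not the last occurrence of its value", structurally
def pvS : List String → Int
  | [] => 0
  | x :: t => (if t.contains x then pvP x else 0) + pvS t

lemma pricesA_eq_sum (l : List String) : pricesA l = (l.map pvP).sum := by
  unfold pricesA
  rw [PySem.List.foldl_pyRange_zero_pyGetD (f := fun tc x =>
    if x == "odin" then tc + 10000
    else if x == "operator" then tc + 8000
    else if x == "bulldog" then tc + 7000
    else if x == "bucky" then tc + 5000
    else if x == "ghost" then tc + 2000
    else if x == "ares" then tc + 9000
    else tc) (d := "")]
  rw [List.foldl_ext _ (fun tc x => tc + pvP x) 0 (fun a b _ => pvChainP a b),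
    PySem.List.foldl_add]
  ring

lemma pvSum_discard (s : List String) (x : String) (hnd : s.Nodup) :
    ((PySem.Set.discard s x).map pvP).sum
      = (s.map pvP).sum - (if s.contains x then pvP x else 0) := by
  induction s with
  | nil => simp [PySem.Set.discard]
  | cons y t ih =>
      rcases List.nodup_cons.mp hnd with ⟨hy, hnt⟩
      by_cases hxy : y = x
      · subst hxy
        have h1 : PySem.Set.discard (y :: t) y = PySem.Set.discard t y := by
          simp [PySem.Set.discard]
        have h2 : PySem.Set.discard t y = t := by
          simp [PySem.Set.discard, List.filter_eq_self]
          intro a ha h; exact hy (h ▸ ha)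
        simp [h1, h2]
      · have h1 : PySem.Set.discard (y :: t) x = y :: PySem.Set.discard t x := by
          simp [PySem.Set.discard, hxy]
        rw [h1]
        simp only [List.map_cons, List.sum_cons, ih hnt, List.contains_cons]
        have : (x == y) = false := by simp; exact fun h => hxy h.symm
        rw [this]
        simp only [Bool.false_or]
        split_ifs <;> ring

lemma pvS_eq_total_sub_distinct (w : List String) :
    pvS w = (w.map pvP).sum - ((PySem.Set.ofList w).map pvP).sum := by
  induction w with
  | nil => simp [pvS, PySem.Set.ofList]
  | cons x t ih =>
      rw [pvS, PySem.Set.ofList_cons]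
      simp only [List.map_cons, List.sum_cons]
      rw [pvSum_discard _ x (PySem.Set.nodup_ofList t)]
      simp only [List.contains_iff_mem, PySem.Set.mem_ofList, ih]
      split_ifs <;> ring

lemma pvIndexSum_eq_S (w : List String) :
    ((List.range w.length).map (fun k =>
      if (w.drop (k+1)).contains (w.getD k "") then pvP (w.getD k "") else 0)).sum = pvS w := by
  induction w with
  | nil => simp [pvS]
  | cons x t ih =>
      rw [List.length_cons, List.range_succ_eq_map]
      simp only [List.map_cons, List.sum_cons, List.map_map]
      have h0 : ((x :: t).drop (0+1)).contains ((x :: t).getD 0 "") = t.contains x := by simp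
      have hsh : ∀ k, ((fun k =>
          if ((x :: t).drop (k+1)).contains ((x :: t).getD k "") then pvP ((x :: t).getD k "") else 0) ∘ Nat.succ) k
          = (fun k => if (t.drop (k+1)).contains (t.getD k "") then pvP (t.getD k "") else 0) k := by
        intro k; simp [Function.comp]
      rw [h0, List.map_congr_left (fun k _ => hsh k), ih, pvS]
      rfl

-- the loop body of A appends guns[i] exactly when guns[i] reappears later in the range
lemma pvBody (n : Int) (guns : List String) (ex : List String) (i : Int) :
    (match (PySem.List.pyRange (i+1) n 1).find?
        (fun j => PySem.List.pyGetD guns j "" == PySem.List.pyGetD guns i "") with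
      | some j => ex ++ [PySem.List.pyGetD guns j ""]
      | none => ex)
    = ex ++ (if (PySem.List.pyRange (i+1) n 1).any
        (fun j => PySem.List.pyGetD guns j "" == PySem.List.pyGetD guns i "")
      then [PySem.List.pyGetD guns i ""] else []) := by
  cases hf : (PySem.List.pyRange (i+1) n 1).find?
      (fun j => PySem.List.pyGetD guns j "" == PySem.List.pyGetD guns i "") with
  | some j =>
      have hpj := List.find?_some hf
      have hany : (PySem.List.pyRange (i+1) n 1).any
          (fun j => PySem.List.pyGetD guns j "" == PySem.List.pyGetD guns i "") = true :=
        List.any_eq_true.mpr ⟨j, List.mem_of_find?_eq_some hf, hpj⟩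
      rw [hany, if_pos rfl]
      simp only [beq_iff_eq] at hpj
      show ex ++ [PySem.List.pyGetD guns j ""] = ex ++ [PySem.List.pyGetD guns i ""]
      rw [hpj]
  | none =>
      have hany : (PySem.List.pyRange (i+1) n 1).any
          (fun j => PySem.List.pyGetD guns j "" == PySem.List.pyGetD guns i "") = false := by
        rw [List.any_eq_false]
        exact fun x hx => List.find?_eq_none.mp hf x hx
      rw [hany]
      simp

theorem findExtras_spec : Claim_equal_findExtras := by
  intro n guns _ hpre
  unfold Spec_findExtras
  by_cases hn1 : n ≤ 1
  · -- degenerate window: A's outer loop is empty, B's window has at most one gun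
    have hA : findExtras n guns = 0 := by
      unfold findExtras
      rw [PySem.List.pyRange_one_eq_nil (by omega : n - 1 ≤ 0)]
      simp [pricesA_eq_sum]
    rw [hA]
    unfold findExtras_alt
    rw [if_pos hn1]
  · have hn2 : 2 ≤ n := by omega
    have hlen : n ≤ (guns.length : Int) := by
      rcases hpre with h | h
      · exact h
      · omega
    set m := n.toNat with hm
    have hmn : (m : Int) = n := by omega
    have hm2 : 2 ≤ m := by omega
    have hmlen : m ≤ guns.length := by omega
    set w := guns.take m with hw
    have hwlen : w.length = m := by
      rw [hw, List.length_take]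
      omega
    have hgetw : ∀ i : Int, 0 ≤ i → i < n → PySem.List.pyGetD guns i "" = PySem.List.pyGetD w i "" := by
      intro i h0 hi
      rw [PySem.List.pyGetD_eq_getElem guns "" h0 (by omega),
          PySem.List.pyGetD_eq_getElem w "" h0 (by rw [hwlen]; omega)]
      exact List.getElem_take.symm
    have hlw : n = PySem.List.len w := by
      rw [PySem.List.len_eq, hwlen]; omega
    have hB : findExtras_alt n guns = pvS w := by
      unfold findExtras_alt
      rw [if_neg (by omega)]
      have hwin : (PySem.List.pyRange 0 n 1).map (fun i => PySem.List.pyGetD guns i "") = w := by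
        rw [List.map_congr_left (fun i hi => by
          rcases (PySem.List.mem_pyRange_one).mp hi with ⟨h0, h1⟩
          exact hgetw i h0 h1)]
        rw [hlw]
        exact PySem.List.map_pyGetD_pyRange_zero w ""
      rw [hwin, pvS_eq_total_sub_distinct]
      rfl
    rw [hB]
    unfold findExtras
    rw [List.foldl_ext _ (fun ex i => ex ++ (if (PySem.List.pyRange (i+1) n 1).any
          (fun j => PySem.List.pyGetD guns j "" == PySem.List.pyGetD guns i "")
        then [PySem.List.pyGetD guns i ""] else [])) []
        (fun a b _ => pvBody n guns a b),
      PySem.List.foldl_append_eq_flatMap, List.nil_append,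
      pricesA_eq_sum, List.map_flatMap, List.flatMap_def, List.sum_flatten, List.map_map,
      PySem.List.pyRange_one, List.map_map]
    have heq : (n - 1 - 0).toNat = m - 1 := by omega
    rw [heq]
    simp only [Function.comp_def, zero_add]
    have hterm : ∀ k ∈ List.range (m - 1),
        (fun k : Nat => (List.map pvP (if (PySem.List.pyRange ((k:Int)+1) n 1).any
            (fun j => PySem.List.pyGetD guns j "" == PySem.List.pyGetD guns (k:Int) "")
          then [PySem.List.pyGetD guns (k:Int) ""] else [])).sum) k
        = (fun k => if (w.drop (k+1)).contains (w.getD k "") then pvP (w.getD k "") else 0) k := by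
      intro k hk
      have hkm : k < m - 1 := List.mem_range.mp hk
      simp only []
      have hget : PySem.List.pyGetD guns (k : Int) "" = w.getD k "" := by
        rw [hgetw k (by omega) (by omega), PySem.List.pyGetD_natCast]
      have hany : (PySem.List.pyRange ((k:Int)+1) n 1).any
          (fun j => PySem.List.pyGetD guns j "" == PySem.List.pyGetD guns (k:Int) "")
          = (w.drop (k+1)).contains (w.getD k "") := by
        rw [PySem.List.any_congr_mem (g := fun j => PySem.List.pyGetD w j "" == w.getD k "")
          (fun j hj => by
            rcases (PySem.List.mem_pyRange_one).mp hj with ⟨hj1, hj2⟩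
            rw [hgetw j (by omega) hj2, hget])]
        have hco : (fun j => PySem.List.pyGetD w j "" == w.getD k "")
            = ((· == w.getD k "") ∘ fun j => PySem.List.pyGetD w j "") := rfl
        rw [hlw, hco, ← List.any_map (f := fun j => PySem.List.pyGetD w j ""),
          PySem.List.map_pyGetD_pyRange w "" (by omega : (0:Int) ≤ (k:Int)+1)]
        have : ((k:Int)+1).toNat = k + 1 := by omega
        rw [this, List.any_beq']
      rw [hany, hget]
      split_ifs <;> simp
    rw [List.map_congr_left hterm]
    -- extend the sum over range (m-1) to range m: the last index never has a later duplicate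
    have hfull := pvIndexSum_eq_S w
    rw [hwlen] at hfull
    have hms : m = (m - 1) + 1 := by omega
    rw [hms, List.range_succ, List.map_append, List.sum_append] at hfull
    have hlast : (if (w.drop ((m-1)+1)).contains (w.getD (m-1) "") then pvP (w.getD (m-1) "") else 0) = 0 := by
      have : w.drop ((m-1)+1) = [] := by
        apply List.drop_eq_nil_of_le
        omega
      rw [this]
      simp
    simp only [List.map_cons, List.map_nil, List.sum_cons, List.sum_nil, hlast] at hfull
    omega
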